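-- pv_equiv track=rewrite | github.com/boris-zhang/general-machine-learning-code | public_lib/lib/data_process.py | comb_cols
-- ===== SOURCE A (Python) =====
-- import itertools
--
-- def proc_tuple(s):
--     '''将[(a, b), (c, d)]处理为[a_b, c_d]形式'''
--     return list(x[0] + '_' + x[1] for x in s)
--
-- def proc_space(s):
--     '''去除list元素中的多余空格'''
--     return list(x.strip() for x in s)
--
-- def comb_cols(col):
--     result_lst = []
--     if type(col) == str:
--         cols_lst = col.split('|')
--         cols_num = len(cols_lst)
--         for col in range(cols_num):
--             if col == 0:
--                 result_lst = []
--             if col == 1: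
--                 tmp1 = cols_lst[col - 1].split(',')
--                 tmp2 = cols_lst[col].split(',')
--                 a = list(itertools.product(proc_space(tmp1), proc_space(tmp2)))
--                 result_lst = proc_tuple(a)
--             if col > 1:
--                 tmp3 = cols_lst[col].split(',')
--                 a = list(itertools.product(result_lst, proc_space(tmp3)))
--                 result_lst = proc_tuple(a)
--         return result_lst
--     else:
--         return []
-- ===== SOURCE B (Python) =====
-- import itertools
--
-- def comb_cols(col):
--     if not isinstance(col, str):
--         return []
--     sections = col.split('|')
--     if len(sections) < 2:
--         return []
--     groups = [[x.strip() for x in s.split(',')] for s in sections]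
--     return ['_'.join(t) for t in itertools.product(*groups)]
-- ===== Notes on version B (the rewrite author's own statement) =====
-- stated objective: idiomatic
-- what changed: Replaces A's index-based pairwise fold (special-cased first pair, then an accumulator re-joined against each further section) with one n-ary itertools.product(*groups) over pre-stripped comma groups, joining each tuple with the underscore separator.
import Mathlib
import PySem

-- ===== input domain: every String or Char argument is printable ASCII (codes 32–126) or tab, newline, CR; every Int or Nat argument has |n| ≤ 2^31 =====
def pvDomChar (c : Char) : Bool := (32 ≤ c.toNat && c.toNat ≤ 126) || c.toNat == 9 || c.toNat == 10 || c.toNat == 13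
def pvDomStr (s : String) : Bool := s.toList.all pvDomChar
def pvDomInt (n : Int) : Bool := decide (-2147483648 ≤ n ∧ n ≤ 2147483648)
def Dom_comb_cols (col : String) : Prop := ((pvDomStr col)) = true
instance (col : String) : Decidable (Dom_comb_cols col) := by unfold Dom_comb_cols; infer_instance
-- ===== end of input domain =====

-- B replaces A's index-based pairwise fold with a single n-ary Cartesian product over
-- all stripped comma groups, joined with '_' (objective: more idiomatic decomposition).

-- ===== PORT A =====
-- x[0] + '_' + x[1] on strings, at the List Char level
def pvJoinPair (x y : List Char) : List Char := x ++ '_' :: y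
-- proc_tuple: [(a,b)] -> [a_b]
def pvProcTuple (s : List (List Char × List Char)) : List (List Char) :=
  s.map (fun x => pvJoinPair x.1 x.2)
-- proc_space: strip every element
def pvProcSpace (s : List (List Char)) : List (List Char) :=
  s.map PySem.Chars.strip
-- list(itertools.product(a, b)) for two lists
def pvProd2 {α β : Type} (a : List α) (b : List β) : List (α × β) :=
  a.flatMap (fun x => b.map (Prod.mk x))

def comb_cols (col : String) : List String :=
  -- `type(col) == str` always holds under the type convention, so only the str branch is ported
  let cols_lst := PySem.Chars.splitOn col.toList ['|']
  let cols_num := cols_lst.length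
  let result_lst :=
    (PySem.List.pyRange 0 (cols_num : Int) 1).foldl (fun result_lst c =>
      let result_lst := if c = 0 then ([] : List (List Char)) else result_lst
      let result_lst :=
        if c = 1 then
          -- indices c-1 and c are always in range of cols_lst, so .getD [] is never used
          let tmp1 := PySem.Chars.splitOn ((PySem.List.pyGet? cols_lst (c - 1)).getD []) [',']
          let tmp2 := PySem.Chars.splitOn ((PySem.List.pyGet? cols_lst c).getD []) [',']
          pvProcTuple (pvProd2 (pvProcSpace tmp1) (pvProcSpace tmp2))
        else result_lst
      let result_lst :=
        if 1 < c then
          let tmp3 := PySem.Chars.splitOn ((PySem.List.pyGet? cols_lst c).getD []) [',']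
          pvProcTuple (pvProd2 result_lst (pvProcSpace tmp3))
        else result_lst
      result_lst) []
  result_lst.map String.ofList

-- ===== PORT B =====
-- itertools.product(*gs): tuples as lists, leftmost group varying slowest
def pvProdAll (gs : List (List (List Char))) : List (List (List Char)) :=
  gs.foldr (fun g acc => g.flatMap (fun x => acc.map (fun t => x :: t))) [[]]

def comb_cols_alt (col : String) : List String :=
  let sections := PySem.Chars.splitOn col.toList ['|']
  if sections.length < 2 then []
  else
    let groups := sections.map (fun s => (PySem.Chars.splitOn s [',']).map PySem.Chars.strip)
    ((pvProdAll groups).map (fun t => PySem.Chars.join ['_'] t)).map String.ofList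

-- ===== PRECONDITION & SPEC =====
def Spec_comb_cols (col : String) (out : List String) : Prop := out = comb_cols_alt col
instance (col : String) (out : List String) : Decidable (Spec_comb_cols col out) := by unfold Spec_comb_cols; infer_instance

-- ===== CLAIM (what is proved, stated in full; the proofs are below) =====
def Claim_equal_comb_cols : Prop := ∀ (col : String), Dom_comb_cols col → Spec_comb_cols col (comb_cols col)

-- ===== LEMMAS AND PROOFS =====

-- every tuple in pvProdAll gs has length gs.length
theorem pvProdAll_mem_length (gs : List (List (List Char))) (t : List (List Char))
    (ht : t ∈ pvProdAll gs) : t.length = gs.length := by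
  induction gs generalizing t with
  | nil => simp [pvProdAll] at ht; simp [ht]
  | cons g rest ih =>
    simp [pvProdAll, List.mem_flatMap] at ht ⊢
    obtain ⟨x, _, t', ht', rfl⟩ := ht
    simp [ih t' ht']

-- appending one group on the right extends every tuple on the right
theorem pvProdAll_append_singleton (gs : List (List (List Char))) (g : List (List Char)) :
    pvProdAll (gs ++ [g]) = (pvProdAll gs).flatMap (fun t => g.map (fun x => t ++ [x])) := by
  induction gs with
  | nil =>
    simp only [pvProdAll, List.nil_append, List.foldr_cons, List.foldr_nil]
    rw [show (List.flatMap (fun t => List.map (fun x => t ++ [x]) g) [[]]) =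
      List.map (fun x => [x]) g by simp]
    exact Eq.symm List.map_eq_flatMap
  | cons h rest ih =>
    simp only [pvProdAll, List.foldr_append, List.foldr_cons] at ih ⊢
    rw [ih]
    simp [List.flatMap_map, List.map_flatMap, List.flatMap_assoc, Function.comp_def]

-- '_'.join(t ++ [x]) = '_'.join(t) + '_' + x for nonempty t
theorem join_append_singleton (t : List (List Char)) (x : List Char) (ht : t ≠ []) :
    PySem.Chars.join ['_'] (t ++ [x]) = pvJoinPair (PySem.Chars.join ['_'] t) x := by
  induction t with
  | nil => exact absurd rfl ht
  | cons a rest ih =>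
    cases rest with
    | nil => simp [PySem.Chars.join_singleton, PySem.Chars.join_cons_cons, pvJoinPair]
    | cons b rest' =>
      have h1 : PySem.Chars.join ['_'] ((a :: b :: rest') ++ [x])
          = a ++ ['_'] ++ PySem.Chars.join ['_'] ((b :: rest') ++ [x]) := by
        rw [List.cons_append]
        exact PySem.Chars.join_cons_cons ['_'] a b (rest' ++ [x])
      rw [h1, ih (by simp), PySem.Chars.join_cons_cons, pvJoinPair, pvJoinPair]
      simp

theorem join_pair (x y : List Char) : PySem.Chars.join ['_'] [x, y] = x ++ '_' :: y := by
  rw [PySem.Chars.join_cons_cons, PySem.Chars.join_singleton]; simp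

-- the loop body of A's fold, named for the invariant proof
def pvBody (cols_lst : List (List Char)) (result_lst : List (List Char)) (c : Int) :
    List (List Char) :=
  let result_lst := if c = 0 then ([] : List (List Char)) else result_lst
  let result_lst :=
    if c = 1 then
      let tmp1 := PySem.Chars.splitOn ((PySem.List.pyGet? cols_lst (c - 1)).getD []) [',']
      let tmp2 := PySem.Chars.splitOn ((PySem.List.pyGet? cols_lst c).getD []) [',']
      pvProcTuple (pvProd2 (pvProcSpace tmp1) (pvProcSpace tmp2))
    else result_lst
  let result_lst :=
    if 1 < c then
      let tmp3 := PySem.Chars.splitOn ((PySem.List.pyGet? cols_lst c).getD []) [',']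
      pvProcTuple (pvProd2 result_lst (pvProcSpace tmp3))
    else result_lst
  result_lst

def pvGroups (cols_lst : List (List Char)) : List (List (List Char)) :=
  cols_lst.map (fun s => (PySem.Chars.splitOn s [',']).map PySem.Chars.strip)

theorem pvGet_group (cols_lst : List (List Char)) (k : Nat) (hk : k < cols_lst.length) :
    (PySem.Chars.splitOn ((PySem.List.pyGet? cols_lst (k : Int)).getD []) [',']).map
        PySem.Chars.strip = (pvGroups cols_lst)[k]'(by simp [pvGroups, hk]) := by
  simp [hk, pvGroups]

-- loop invariant: after iterations 0..k-1 (k ≥ 2) the accumulator is the joined product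
-- of the first k groups
theorem pvLoop_inv (cols_lst : List (List Char)) (k : Nat) (h2 : 2 ≤ k)
    (hk : k ≤ cols_lst.length) :
    (PySem.List.pyRange 0 (k : Int) 1).foldl (pvBody cols_lst) [] =
      (pvProdAll ((pvGroups cols_lst).take k)).map (PySem.Chars.join ['_']) := by
  induction k with
  | zero => omega
  | succ k ih =>
    rcases Nat.lt_or_ge k 2 with hlt | hge
    · -- base case: k + 1 = 2
      have hk2 : k = 1 := by omega
      subst hk2
      have h0 : (0 : Nat) < cols_lst.length := by omega
      have h1 : (1 : Nat) < cols_lst.length := by omega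
      have hr : PySem.List.pyRange 0 (2 : Int) 1 = [0, 1] := by decide
      have hcast : (((1 : Nat) + 1 : Nat) : Int) = (2 : Int) := by norm_num
      rw [hcast, hr]
      simp only [List.foldl_cons, List.foldl_nil]
      have hb0 : pvBody cols_lst [] 0 = [] := by simp [pvBody]
      rw [hb0]
      have e0 := pvGet_group cols_lst 0 h0
      have e1 := pvGet_group cols_lst 1 h1
      have hglen : 2 ≤ (pvGroups cols_lst).length := by simp [pvGroups]; omega
      obtain ⟨g0, t0, hgs0⟩ := List.exists_cons_of_ne_nil (l := pvGroups cols_lst)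
        (by intro h; rw [h] at hglen; simp at hglen)
      obtain ⟨g1, t1, hgs1⟩ := List.exists_cons_of_ne_nil (l := t0)
        (by intro h; rw [hgs0, h] at hglen; simp at hglen)
      have hgs : pvGroups cols_lst = g0 :: g1 :: t1 := by rw [hgs0, hgs1]
      simp only [pvBody, show (1 : Int) ≠ 0 by decide, reduceIte,
        show ¬ (1 : Int) < 1 by decide]
      rw [show ((1 : Int) - 1) = ((0 : Nat) : Int) by norm_num]
      rw [show (1 : Int) = ((1 : Nat) : Int) by norm_num]
      rw [pvProcSpace, pvProcSpace, e0, e1]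
      have hg0 : (pvGroups cols_lst)[0]'(by omega) = g0 := by simp [hgs]
      have hg1 : (pvGroups cols_lst)[1]'(by omega) = g1 := by simp [hgs]
      have htake : List.take (1 + 1) (pvGroups cols_lst) = [g0, g1] := by
        rw [hgs]; rfl
      rw [hg0, hg1, htake]
      simp [pvProdAll, pvProcTuple, pvProd2,
        pvJoinPair, List.map_eq_flatMap, List.flatMap_assoc, join_pair]
    · -- step: k ≥ 2
      have hkl : k ≤ cols_lst.length := by omega
      have hcast : (((k + 1 : Nat)) : Int) = (k : Int) + 1 := by push_cast; ring
      rw [hcast]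
      rw [PySem.List.pyRange_one_append 0 (k : Int) ((k : Int) + 1) (by positivity) (by omega)]
      rw [List.foldl_append]
      rw [ih hge hkl]
      have hrk : PySem.List.pyRange (k : Int) ((k : Int) + 1) 1 = [(k : Int)] := by
        rw [PySem.List.pyRange_one_cons (by omega)]
        simp [PySem.List.pyRange]
      rw [hrk]
      simp only [List.foldl_cons, List.foldl_nil]
      -- body at c = k ≥ 2 takes only the third branch
      have hkk : k < cols_lst.length := by omega
      have ek := pvGet_group cols_lst k hkk
      rw [pvBody]
      simp only [show ((k : Nat) : Int) ≠ 0 by omega, show ((k : Nat) : Int) ≠ 1 by omega,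
        show (1 : Int) < ((k : Nat) : Int) by omega, reduceIte]
      rw [pvProcSpace, ek]
      -- rewrite take (k+1) as take k ++ [G[k]]
      have hlen : k < (pvGroups cols_lst).length := by simp [pvGroups]; omega
      rw [List.take_add_one, List.getElem?_eq_getElem hlen]
      simp only [Option.toList_some]
      rw [pvProdAll_append_singleton]
      rw [List.map_flatMap]
      rw [pvProcTuple, pvProd2, List.map_flatMap, List.flatMap_map]
      apply List.flatMap_congr
      intro t ht
      have htne : t ≠ [] := by
        have := pvProdAll_mem_length _ t ht
        intro h; subst h
        simp [List.length_take] at this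
        omega
      simp only [Function.comp_def, List.map_map]
      apply List.map_congr_left
      intro x _
      simp [join_append_singleton t x htne, pvJoinPair]

-- comb_cols, with its let-bindings reduced, is exactly the pvBody fold (definitional)
theorem comb_cols_eq (col : String) : comb_cols col =
    ((PySem.List.pyRange 0 (((PySem.Chars.splitOn col.toList ['|']).length : Nat) : Int) 1).foldl
      (pvBody (PySem.Chars.splitOn col.toList ['|'])) []).map String.ofList := rfl

-- comb_cols_alt, with its let-bindings reduced (definitional)
theorem comb_cols_alt_eq (col : String) : comb_cols_alt col =
    if (PySem.Chars.splitOn col.toList ['|']).length < 2 then []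
    else ((pvProdAll (pvGroups (PySem.Chars.splitOn col.toList ['|']))).map
      (PySem.Chars.join ['_'])).map String.ofList := rfl

-- ===== VERDICT (by name: the statement is the Claim_ definition above) =====
theorem comb_cols_spec : Claim_equal_comb_cols := by
  intro col _
  show comb_cols col = comb_cols_alt col
  rw [comb_cols_eq, comb_cols_alt_eq]
  set cols_lst := PySem.Chars.splitOn col.toList ['|'] with hc
  by_cases hlen : cols_lst.length < 2
  · -- fewer than 2 sections: A's loop never leaves [], B returns []
    rw [if_pos hlen]
    have h01 : cols_lst.length = 0 ∨ cols_lst.length = 1 := by omega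
    rcases h01 with h | h <;> rw [h]
    · rw [show PySem.List.pyRange 0 (((0 : Nat) : Int)) 1 = [] from by decide]
      simp
    · rw [show PySem.List.pyRange 0 (((1 : Nat) : Int)) 1 = [0] from by decide]
      simp [pvBody]
  · rw [if_neg hlen]
    have h2 : 2 ≤ cols_lst.length := by omega
    have hinv := pvLoop_inv cols_lst cols_lst.length h2 le_rfl
    rw [List.take_of_length_le (by simp [pvGroups])] at hinv
    rw [hinv]
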